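-- pv_equiv track=rewrite | github.com/acherm/agentic-arnoldc | test_bf.py | _parse_arnoldc_output
-- ===== SOURCE A (Python) =====
-- def _parse_arnoldc_output(stdout):
--     """Parse ArnoldC output into (output_ints, tape_cells, dp)."""
--     lines = stdout.strip().split("\n")
--
--     try:
--         sep_idx = lines.index("---")
--     except ValueError:
--         # No separator — treat all lines as output
--         output_ints = [int(l) for l in lines if l.strip()]
--         return output_ints, [], -1
--
--     output_lines = lines[:sep_idx]
--     output_ints = [int(l) for l in output_lines if l.strip()]
--
--     meta = lines[sep_idx + 1:]
--     tape_start = meta.index("TAPE") + 1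
--     dp_idx = meta.index("DP")
--     tape = [int(meta[i]) for i in range(tape_start, dp_idx)]
--     dp = int(meta[dp_idx + 1])
--
--     return output_ints, tape, dp
-- ===== SOURCE B (Python) =====
-- def _parse_arnoldc_output(stdout):
--     """Parse ArnoldC output into (output_ints, tape_cells, dp) in one linear pass."""
--     output_ints = []
--     tape = []
--     dp = None
--     phase = "output"          # output -> meta -> tape -> dp -> done
--     for line in stdout.strip().split("\n"):
--         if phase == "output":
--             if line == "---":
--                 phase = "meta"
--             elif line.strip():
--                 output_ints.append(int(line))
--         elif phase == "dp":
--             dp = int(line)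
--             phase = "done"
--             break
--         elif line == "DP":      # first DP ends the tape (possibly before any TAPE)
--             phase = "dp"
--         elif phase == "tape":
--             tape.append(int(line))
--         elif line == "TAPE":    # phase == "meta": skip until the first TAPE
--             phase = "tape"
--     if phase == "output":
--         return output_ints, [], -1
--     if dp is None:
--         raise ValueError("malformed metadata")
--     return output_ints, tape, dp
-- ===== Notes on version B (the rewrite author's own statement) =====
-- stated objective: alternative
-- what changed: Replaces A's index()/slice/re-index decomposition (find '---', slice output, find 'TAPE' and 'DP' in the meta slice, re-index the tape range) by a single linear state-machine pass over the lines with states output -> meta -> tape -> dp, maintaining output_ints, tape and dp incrementally.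
import Mathlib
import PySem

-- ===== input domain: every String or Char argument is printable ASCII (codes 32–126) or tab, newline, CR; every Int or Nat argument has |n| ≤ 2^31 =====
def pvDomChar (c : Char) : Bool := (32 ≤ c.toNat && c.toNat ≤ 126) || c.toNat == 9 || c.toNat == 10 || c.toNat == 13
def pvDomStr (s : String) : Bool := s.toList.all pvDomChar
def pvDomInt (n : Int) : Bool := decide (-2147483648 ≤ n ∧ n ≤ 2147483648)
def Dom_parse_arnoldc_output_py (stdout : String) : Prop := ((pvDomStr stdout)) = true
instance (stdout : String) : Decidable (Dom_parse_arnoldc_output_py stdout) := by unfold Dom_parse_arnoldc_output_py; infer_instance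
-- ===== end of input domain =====

-- B replaces A's index()/slice/re-index decomposition by a single linear state-machine pass over the
-- lines (output → meta → tape → dp); equal return values are proved on Pre_ (exactly where A returns).

-- shared tokenization (both Pythons start with stdout.strip().split("\n")) and int(l);
-- pvIntDef is total with default 0: Pre_ admits only inputs where every int() call succeeds
def pvLines (stdout : String) : List String :=
  (PySem.Str.split? (PySem.Str.strip stdout) "\n").getD []
def pvIntDef (l : String) : Int := (PySem.Int.ofStr? l).getD 0

-- ===== PORT A =====
def parse_arnoldc_output_py (stdout : String) : List Int × List Int × Int :=
  let lines := pvLines stdout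
  match PySem.List.index? lines "---" with
  | none =>
    ((lines.filter (fun l => PySem.Str.strip l != "")).map pvIntDef, [], -1)
  | some sepIdx =>
    let output_lines := PySem.List.slice lines none (some (sepIdx : Int))
    let output_ints := (output_lines.filter (fun l => PySem.Str.strip l != "")).map pvIntDef
    let metaLs := PySem.List.slice lines (some ((sepIdx : Int) + 1)) none
    match PySem.List.index? metaLs "TAPE", PySem.List.index? metaLs "DP" with
    | some tIdx, some dpIdx =>
      let tape_start : Int := (tIdx : Int) + 1
      let tape := (PySem.List.pyRange tape_start (dpIdx : Int) 1).map
        (fun i => pvIntDef (PySem.List.pyGetD metaLs i ""))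
      let dp := pvIntDef (PySem.List.pyGetD metaLs ((dpIdx : Int) + 1) "")
      (output_ints, tape, dp)
    | _, _ => (output_ints, [], 0)  -- Python raises ValueError here ('TAPE'/'DP' missing); outside Pre_

-- ===== PORT B =====
-- state "dp": the very next line is dp (on [] the Python B raises ValueError; outside Pre_)
def altDp (out tape : List Int) : List String → List Int × List Int × Int
  | [] => (out, tape, 0)
  | l :: _ => (out, tape, pvIntDef l)
def altTape (out : List Int) : List String → List Int → List Int × List Int × Int
  | [], _ => (out, [], 0)
  | l :: rest, tape => if l = "DP" then altDp out tape rest else altTape out rest (tape ++ [pvIntDef l])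
def altMeta (out : List Int) : List String → List Int × List Int × Int
  | [] => (out, [], 0)
  | l :: rest => if l = "DP" then altDp out [] rest
                 else if l = "TAPE" then altTape out rest []
                 else altMeta out rest
def altOut : List String → List Int → List Int × List Int × Int
  | [], out => (out, [], -1)
  | l :: rest, out =>
    if l = "---" then altMeta out rest
    else if PySem.Str.strip l != "" then altOut rest (out ++ [pvIntDef l])
    else altOut rest out
def parse_arnoldc_output_py_alt (stdout : String) : List Int × List Int × Int :=
  altOut (pvLines stdout) []

-- ===== PRECONDITION & SPEC =====
-- Pre_ holds exactly where the Python A returns normally: every line int() is applied to parses,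
-- and after a "---" separator the meta block contains "TAPE" and "DP" with a line after "DP".
def pvPreB (stdout : String) : Bool :=
  let lines := pvLines stdout
  (PySem.List.index? lines "---").elim
    (lines.all fun l => PySem.Str.strip l == "" || (PySem.Int.ofStr? l).isSome)
    (fun s =>
      ((lines.take s).all fun l => PySem.Str.strip l == "" || (PySem.Int.ofStr? l).isSome) &&
      (let metaLs := lines.drop (s+1)
       (PySem.List.index? metaLs "TAPE").elim false (fun t =>
         (PySem.List.index? metaLs "DP").elim false (fun d =>
           ((metaLs.drop (t+1)).take (d - (t+1))).all (fun l => (PySem.Int.ofStr? l).isSome) &&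
           decide (d + 1 < metaLs.length) && (PySem.Int.ofStr? (metaLs.getD (d+1) "")).isSome))))

def Pre_parse_arnoldc_output_py (stdout : String) : Prop := pvPreB stdout = true
instance (stdout : String) : Decidable (Pre_parse_arnoldc_output_py stdout) := by
  unfold Pre_parse_arnoldc_output_py; infer_instance

def pvWitness_parse_arnoldc_output_py : String := "1\n\n2\n---\nTAPE\n5\n-3\nDP\n7"

def Spec_parse_arnoldc_output_py (stdout : String) (out : List Int × List Int × Int) : Prop := out = parse_arnoldc_output_py_alt stdout
instance (stdout : String) (out : List Int × List Int × Int) : Decidable (Spec_parse_arnoldc_output_py stdout out) := by unfold Spec_parse_arnoldc_output_py; infer_instance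

-- ===== CLAIM (what is proved, stated in full; the proofs are below) =====
def Claim_equal_parse_arnoldc_output_py : Prop := ∀ (stdout : String), Dom_parse_arnoldc_output_py stdout → Pre_parse_arnoldc_output_py stdout → Spec_parse_arnoldc_output_py stdout (parse_arnoldc_output_py stdout)

-- ===== LEMMAS AND PROOFS =====

theorem altOut_no_sep (ls : List String) (acc : List Int) (h : "---" ∉ ls) :
    altOut ls acc = (acc ++ (ls.filter (fun l => PySem.Str.strip l != "")).map pvIntDef, [], -1) := by
  induction ls generalizing acc with
  | nil => simp [altOut]
  | cons l rest ih =>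
    simp only [List.mem_cons, not_or] at h
    rw [altOut]
    rw [if_neg (fun hc => h.1 hc.symm)]
    by_cases hb : PySem.Str.strip l != ""
    · rw [if_pos hb, ih _ h.2]; simp [hb]
    · rw [if_neg hb, ih _ h.2]; simp at hb; simp [hb]

theorem altOut_sep (pre suf : List String) (acc : List Int) (h : "---" ∉ pre) :
    altOut (pre ++ "---" :: suf) acc
      = altMeta (acc ++ (pre.filter (fun l => PySem.Str.strip l != "")).map pvIntDef) suf := by
  induction pre generalizing acc with
  | nil => simp [altOut]
  | cons l rest ih =>
    simp only [List.mem_cons, not_or] at h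
    rw [List.cons_append, altOut, if_neg (fun hc => h.1 hc.symm)]
    by_cases hb : PySem.Str.strip l != ""
    · rw [if_pos hb, ih _ h.2]; simp [hb]
    · rw [if_neg hb, ih _ h.2]; simp at hb; simp [hb]

theorem altMeta_tape (pre suf : List String) (out : List Int)
    (hd : "DP" ∉ pre) (ht : "TAPE" ∉ pre) :
    altMeta out (pre ++ "TAPE" :: suf) = altTape out suf [] := by
  induction pre with
  | nil => simp [altMeta]
  | cons l rest ih =>
    simp only [List.mem_cons, not_or] at hd ht
    rw [List.cons_append, altMeta, if_neg (fun hc => hd.1 hc.symm),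
        if_neg (fun hc => ht.1 hc.symm), ih hd.2 ht.2]

theorem altMeta_dp (pre rest : List String) (out : List Int)
    (hd : "DP" ∉ pre) (ht : "TAPE" ∉ pre) :
    altMeta out (pre ++ "DP" :: rest) = altDp out [] rest := by
  induction pre with
  | nil => simp [altMeta]
  | cons l r ih =>
    simp only [List.mem_cons, not_or] at hd ht
    rw [List.cons_append, altMeta, if_neg (fun hc => hd.1 hc.symm),
        if_neg (fun hc => ht.1 hc.symm), ih hd.2 ht.2]

theorem altTape_run (mid rest : List String) (out : List Int) (tape : List Int)
    (hd : "DP" ∉ mid) :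
    altTape out (mid ++ "DP" :: rest) tape = altDp out (tape ++ mid.map pvIntDef) rest := by
  induction mid generalizing tape with
  | nil => simp [altTape]
  | cons l r ih =>
    simp only [List.mem_cons, not_or] at hd
    rw [List.cons_append, altTape, if_neg (fun hc => hd.1 hc.symm), ih _ hd.2]
    simp

theorem map_pyGetD_range (xs : List String) (a b : Nat) (hb : b ≤ xs.length) :
    (PySem.List.pyRange (a : Int) (b : Int) 1).map (fun i => pvIntDef (PySem.List.pyGetD xs i "")) =
      ((xs.drop a).take (b - a)).map pvIntDef := by
  have : (fun i => pvIntDef (PySem.List.pyGetD xs i "")) = pvIntDef ∘ (fun i => PySem.List.pyGetD xs i "") := rfl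
  rw [this, ← List.map_map]
  congr 1
  apply List.ext_getElem
  · simp [PySem.List.length_pyRange_one]
    omega
  · intro k h1 h2
    rw [List.getElem_map, PySem.List.getElem_pyRange_one]
    have hk : k < b - a := by simp at h2; omega
    have : ((a : Int) + (k : Int)) = ((a + k : Nat) : Int) := by push_cast; ring
    rw [this, PySem.List.pyGetD_natCast]
    rw [List.getElem_take, List.getElem_drop]
    rw [List.getD_eq_getElem _ _ (by omega)]

theorem altDp_eq (out tape : List Int) (rest : List String) :
    altDp out tape rest = (out, tape, pvIntDef (rest.getD 0 "")) := by
  cases rest with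
  | nil => simp [altDp]; decide
  | cons l r => simp [altDp]

theorem pv_main (stdout : String) (hpre : pvPreB stdout = true) :
    parse_arnoldc_output_py stdout = parse_arnoldc_output_py_alt stdout := by
  simp only [pvPreB] at hpre
  simp only [parse_arnoldc_output_py, parse_arnoldc_output_py_alt]
  set ls := pvLines stdout with hls
  clear_value ls
  cases hsep : PySem.List.index? ls "---" with
  | none =>
    rw [altOut_no_sep ls [] (by rwa [← PySem.List.index?_eq_none_iff])]
    simp
  | some s =>
    rw [hsep] at hpre
    simp only [Option.elim_some] at hpre
    obtain ⟨pre, suf, hdecomp, hlen, hnotin⟩ := (PySem.List.index?_eq_some_iff _ _ _).1 hsep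
    have hmeta : PySem.List.slice ls (some ((s : Int) + 1)) none = suf := by
      have h1 : ((s : Int) + 1) = ((s + 1 : Nat) : Int) := by push_cast; ring
      rw [h1, PySem.List.slice_from_natCast, hdecomp, ← hlen]
      have h2 : pre.length + 1 = (pre ++ ["---"]).length := by simp
      have h3 : pre ++ "---" :: suf = (pre ++ ["---"]) ++ suf := by simp
      rw [h2, h3, List.drop_left]
    have hdropEq : ls.drop (s+1) = suf := by
      rw [hdecomp, ← hlen]
      have h2 : pre.length + 1 = (pre ++ ["---"]).length := by simp
      have h3 : pre ++ "---" :: suf = (pre ++ ["---"]) ++ suf := by simp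
      rw [h2, h3, List.drop_left]
    have htake : PySem.List.slice ls none (some (s : Int)) = pre := by
      rw [PySem.List.slice_to_natCast, hdecomp, ← hlen, List.take_left]
    simp only [hmeta, hdropEq, htake] at hpre ⊢
    rw [show pre ++ "---" :: suf = pre ++ "---" :: suf from rfl] at hdecomp
    conv_rhs => rw [hdecomp]
    rw [altOut_sep pre suf [] hnotin, List.nil_append]
    cases ht : PySem.List.index? suf "TAPE" with
    | none => rw [ht] at hpre; simp at hpre
    | some t =>
      cases hd : PySem.List.index? suf "DP" with
      | none => rw [ht, hd] at hpre; simp at hpre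
      | some d =>
        rw [ht, hd] at hpre
        simp only [Option.elim_some, Bool.and_eq_true, decide_eq_true_eq] at hpre
        dsimp only
        obtain ⟨-, ⟨-, hdlt⟩, -⟩ := hpre
        obtain ⟨htl, htv, htfirst⟩ := PySem.List.getElem_of_index?_eq_some ht
        obtain ⟨hdl, hdv, hdfirst⟩ := PySem.List.getElem_of_index?_eq_some hd
        have hdp : pvIntDef (PySem.List.pyGetD suf ((d : Int) + 1) "") = pvIntDef ((suf.drop (d+1)).getD 0 "") := by
          have h1 : ((d : Int) + 1) = ((d + 1 : Nat) : Int) := by push_cast; ring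
          rw [h1, PySem.List.pyGetD_natCast]
          simp [List.getD, List.getElem?_drop]
        rcases Nat.lt_or_ge d t with hlt | hge
        · -- DP before TAPE: tape empty
          obtain ⟨preD, rest, hdec2, hlen2, hnot2⟩ := (PySem.List.index?_eq_some_iff _ _ _).1 hd
          have hTnot : "TAPE" ∉ preD := by
            intro hmem
            obtain ⟨j, hj, hEq⟩ := List.getElem_of_mem hmem
            refine htfirst j (by omega) ?_
            rw [List.getElem_of_eq hdec2, List.getElem_append_left (by omega)]
            exact hEq
          have hrest : suf.drop (d+1) = rest := by
            rw [hdec2, ← hlen2]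
            have h2 : preD.length + 1 = (preD ++ ["DP"]).length := by simp
            have h3 : preD ++ "DP" :: rest = (preD ++ ["DP"]) ++ rest := by simp
            rw [h2, h3, List.drop_left]
          conv_rhs => rw [hdec2]
          rw [altMeta_dp preD rest _ hnot2 hTnot, altDp_eq]
          rw [PySem.List.pyRange_one_eq_nil (by exact_mod_cast by omega)]
          rw [hdp, hrest]
          simp
        · -- TAPE before DP
          have htd : t ≠ d := by intro h; subst h; rw [htv] at hdv; exact absurd hdv (by decide)
          have htltd : t < d := by omega
          obtain ⟨preT, sufT, hdec2, hlen2, hnot2⟩ := (PySem.List.index?_eq_some_iff _ _ _).1 ht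
          have hDnot : "DP" ∉ preT := by
            intro hmem
            obtain ⟨j, hj, hEq⟩ := List.getElem_of_mem hmem
            refine hdfirst j (by omega) ?_
            rw [List.getElem_of_eq hdec2, List.getElem_append_left (by omega)]
            exact hEq
          have hsufT : suf.drop (t+1) = sufT := by
            rw [hdec2, ← hlen2]
            have h2 : preT.length + 1 = (preT ++ ["TAPE"]).length := by simp
            have h3 : preT ++ "TAPE" :: sufT = (preT ++ ["TAPE"]) ++ sufT := by simp
            rw [h2, h3, List.drop_left]
          -- decompose sufT at the first DP
          have hmid : suf.drop (t+1) = (suf.drop (t+1)).take (d - (t+1)) ++ "DP" :: suf.drop (d+1) := by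
            conv_lhs => rw [← List.take_append_drop (d - (t+1)) (suf.drop (t+1))]
            congr 1
            rw [List.drop_drop]
            rw [show t + 1 + (d - (t+1)) = d from by omega]
            rw [List.drop_eq_getElem_cons hdl, hdv]
          have hmidnot : "DP" ∉ (suf.drop (t+1)).take (d - (t+1)) := by
            intro hmem
            obtain ⟨j, hj, hEq⟩ := List.getElem_of_mem hmem
            have hjlt : j < d - (t+1) := by
              have := hj; simp [List.length_take, List.length_drop] at this; omega
            refine hdfirst (t+1+j) (by omega) ?_
            rw [← hEq, List.getElem_take, List.getElem_drop]
          conv_rhs => rw [hdec2, altMeta_tape preT _ _ hDnot hnot2, ← hsufT, hmid,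
            altTape_run _ _ _ _ hmidnot, altDp_eq]
          rw [hdp]
          have hmap := map_pyGetD_range suf (t+1) d (by omega)
          have hcast : ((t+1 : Nat) : Int) = (t : Int) + 1 := by push_cast; ring
          rw [hcast] at hmap
          rw [hmap]
          simp

-- ===== VERDICT (by name: the statement is the Claim_ definition above) =====
theorem pv_bridge (stdout : String) (hpre : Pre_parse_arnoldc_output_py stdout) :
    pvPreB stdout = true := hpre

theorem parse_arnoldc_output_py_spec : Claim_equal_parse_arnoldc_output_py := by
  intro stdout _ hpre
  show parse_arnoldc_output_py stdout = parse_arnoldc_output_py_alt stdout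
  exact pv_main stdout (pv_bridge stdout hpre)
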